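-- pv_equiv track=rewrite | github.com/bobrovsky420/my-dev-team | src/devteam/cli.py | parse_spec_from_string
-- ===== SOURCE A (Python) =====
-- def parse_spec_from_string(content: str) -> tuple[str, str]:
--     name = 'New Project'
--     lines = content.split('\n')
--     for line in lines:
--         if not line.strip():
--             break
--         if line.startswith('Subject:') and 'NEW PROJECT:' in line:
--             extracted_name = line.split('NEW PROJECT:', 1)[-1].strip()
--             if extracted_name:
--                 name = extracted_name
--     return name, content.strip()
-- ===== SOURCE B (Python) =====
-- def parse_spec_from_string(content: str) -> tuple[str, str]:
--     lines = content.split('\n')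
--     blank = next((i for i, line in enumerate(lines) if not line.strip()), len(lines))
--     header = lines[:blank]
--     name = next((ex for line in reversed(header)
--                  if line.startswith('Subject:') and 'NEW PROJECT:' in line
--                  for ex in [line.split('NEW PROJECT:', 1)[-1].strip()]
--                  if ex),
--                 'New Project')
--     return name, content.strip()
-- ===== Notes on version B (the rewrite author's own statement) =====
-- stated objective: idiomatic
-- what changed: Replaces A's single accumulate-last loop (mutable name, break on blank line) with an explicit header cut at the first blank line followed by a reversed first-match scan expressed as next() over a generator.
import Mathlib
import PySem

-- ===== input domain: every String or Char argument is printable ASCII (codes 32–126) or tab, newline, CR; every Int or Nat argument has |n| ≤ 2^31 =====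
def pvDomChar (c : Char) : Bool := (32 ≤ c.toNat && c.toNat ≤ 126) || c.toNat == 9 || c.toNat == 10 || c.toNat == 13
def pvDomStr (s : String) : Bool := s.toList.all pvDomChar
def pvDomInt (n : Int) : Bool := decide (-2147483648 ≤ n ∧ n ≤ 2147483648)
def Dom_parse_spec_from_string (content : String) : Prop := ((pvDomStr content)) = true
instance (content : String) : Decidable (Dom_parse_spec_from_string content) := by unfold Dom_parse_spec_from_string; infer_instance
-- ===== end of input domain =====

-- B replaces A's accumulate-last loop with a blank-line cut (lines[:first blank]) plus a
-- reversed first-match scan; objective: idiomatic, same cost, same return value.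

-- ===== PORT A =====
-- the for-loop of A: accumulator 'name', break on a blank line
def pvLoopA : List String → String → String
  | [], name => name
  | line :: rest, name =>
    if PySem.Str.strip line == "" then name
    else
      let name' :=
        if PySem.Str.startswith line "Subject:" && PySem.Str.isIn "NEW PROJECT:" line then
          let extracted :=
            PySem.Str.strip
              ((PySem.List.pyGet? ((PySem.Str.splitMax? line "NEW PROJECT:" 1).getD []) (-1)).getD "")
          if extracted ≠ "" then extracted else name
        else name
      pvLoopA rest name'

def parse_spec_from_string (content : String) : String × String :=
  ((pvLoopA ((PySem.Str.split? content "\n").getD []) "New Project"), PySem.Str.strip content)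

-- ===== PORT B =====
-- the per-line extractor of B's generator expression: some name iff the line matches
def pvExtract (line : String) : Option String :=
  if PySem.Str.startswith line "Subject:" && PySem.Str.isIn "NEW PROJECT:" line then
    let ex :=
      PySem.Str.strip
        ((PySem.List.pyGet? ((PySem.Str.splitMax? line "NEW PROJECT:" 1).getD []) (-1)).getD "")
    if ex ≠ "" then some ex else none
  else none

def parse_spec_from_string_alt (content : String) : String × String :=
  let lines := (PySem.Str.split? content "\n").getD []
  let blank := (lines.findIdx? (fun line => PySem.Str.strip line == "")).getD lines.length
  let header := lines.take blank
  let name := (header.reverse.findSome? pvExtract).getD "New Project"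
  (name, PySem.Str.strip content)

-- ===== PRECONDITION & SPEC =====
def Spec_parse_spec_from_string (content : String) (out : String × String) : Prop := out = parse_spec_from_string_alt content
instance (content : String) (out : String × String) : Decidable (Spec_parse_spec_from_string content out) := by unfold Spec_parse_spec_from_string; infer_instance

-- ===== CLAIM (what is proved, stated in full; the proofs are below) =====
def Claim_equal_parse_spec_from_string : Prop := ∀ (content : String), Dom_parse_spec_from_string content → Spec_parse_spec_from_string content (parse_spec_from_string content)

-- ===== LEMMAS AND PROOFS =====

-- lines[:first blank index] is takeWhile (non-blank)
theorem pv_take_findIdx (p : String → Bool) (l : List String) :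
    l.take ((l.findIdx? p).getD l.length) = l.takeWhile (fun x => !p x) := by
  induction l with
  | nil => simp
  | cons a t ih =>
    simp only [List.findIdx?_cons, List.takeWhile_cons]
    by_cases h : p a
    · simp [h]
    · cases ht : t.findIdx? p with
      | none => simpa [h, ht] using ih
      | some i => simpa [h, ht] using ih

-- A's loop result = reversed-first-match over the non-blank prefix, defaulting to the accumulator
theorem pv_loop_eq (lines : List String) (name : String) :
    pvLoopA lines name =
      ((lines.takeWhile (fun l => !(PySem.Str.strip l == ""))).reverse.findSome? pvExtract).getD name := by
  induction lines generalizing name with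
  | nil => simp [pvLoopA]
  | cons line rest ih =>
    by_cases hb : PySem.Str.strip line == ""
    · simp [pvLoopA, hb]
    · have hstep : pvLoopA (line :: rest) name = pvLoopA rest ((pvExtract line).getD name) := by
        simp only [pvLoopA, hb]
        unfold pvExtract
        split_ifs with h1 h2 <;> simp_all
      rw [hstep, ih]
      simp only [List.takeWhile_cons, hb, Bool.not_false, if_pos, List.reverse_cons,
        List.findSome?_append]
      cases hfs : (rest.takeWhile (fun l => !(PySem.Str.strip l == ""))).reverse.findSome? pvExtract with
      | none => cases hx : pvExtract line <;> simp [hfs, hx, List.findSome?]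
      | some v => simp

-- ===== VERDICT (by name: the statement is the Claim_ definition above) =====
theorem parse_spec_from_string_spec : Claim_equal_parse_spec_from_string := by
  intro content _
  unfold Spec_parse_spec_from_string parse_spec_from_string parse_spec_from_string_alt
  simp only []
  rw [pv_take_findIdx, pv_loop_eq]
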